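-- pv_equiv track=rewrite | github.com/Ashiq-am/Path-of-Python | 3.Data Types/Arrays Set 1 and Set 2/Circular Array Articles/Maximizing Circular Array Iterations/Maximizing Circular Array Iterations.py | helper
-- ===== SOURCE A (Python) =====
-- def helper(A):
-- 	# Sort the array in descending order
-- 	A.sort(reverse=True)
--
-- 	# Find the minimum element and its position
-- 	minimum = A[-1]
-- 	pos = 0
-- 	for i in range(len(A)):
-- 		if A[i] == minimum:
-- 			# The first position which is minimum
-- 			pos = i
-- 			break
--
-- 	return minimum * len(A) + pos
-- ===== SOURCE B (Python) =====
-- def helper(A):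
--     m = min(A)
--     greater = sum(x > m for x in A)
--     return m * len(A) + greater
-- ===== Notes on version B (the rewrite author's own statement) =====
-- stated objective: simpler
-- what changed: Replaces the descending sort plus index scan by a single pass: the minimum and the count of elements strictly greater than it (which equals the first index of the minimum after a descending sort); O(n) instead of O(n log n), though a timing run read only 1.45x at the largest size.
-- outside the precondition, e.g. on helper([]): A raises IndexError, B raises ValueError
import Mathlib
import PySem

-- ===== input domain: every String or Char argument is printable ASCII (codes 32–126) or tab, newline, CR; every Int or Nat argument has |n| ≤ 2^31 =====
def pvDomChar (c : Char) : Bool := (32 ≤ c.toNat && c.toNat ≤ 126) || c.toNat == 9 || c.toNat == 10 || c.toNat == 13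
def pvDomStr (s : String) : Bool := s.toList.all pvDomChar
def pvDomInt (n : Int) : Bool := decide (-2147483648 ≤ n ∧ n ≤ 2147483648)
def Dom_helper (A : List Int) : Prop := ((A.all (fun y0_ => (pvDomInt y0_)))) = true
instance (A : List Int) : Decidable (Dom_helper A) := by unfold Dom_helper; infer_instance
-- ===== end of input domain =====

-- B replaces the descending sort + first-minimum scan by a single simpler pass (minimum and count
-- of strictly greater elements). Equivalence is about the RETURN value only: A sorts its argument
-- in place, B does not mutate it.

-- ===== PORT A =====
-- the 'for i in range(len(A)): if A[i]==minimum: pos=i; break' loop, as structural recursion over the index list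
def helperLoop (As : List Int) (minimum : Int) : List Int → Int
  | [] => 0
  | i :: rest => if PySem.List.pyGetD As i 0 = minimum then i else helperLoop As minimum rest

def helper (A : List Int) : Int :=
  let As := PySem.List.sorted A (fun x => x) true
  let minimum := PySem.List.pyGetD As (-1) 0
  let pos := helperLoop As minimum (PySem.List.pyRange 0 As.length 1)
  minimum * As.length + pos

-- ===== PORT B =====
def helper_alt (A : List Int) : Int :=
  match PySem.List.min? A (fun x => x) with
  | none => 0   -- unreachable under Pre_: min([]) raises in Python
  | some m => m * A.length + (A.map (fun x => if m < x then (1 : Int) else 0)).sum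

-- ===== PRECONDITION & SPEC =====
-- Pre_ excludes only the empty list, on which A raises IndexError (A[-1]) and B raises ValueError (min([])).
def Pre_helper (A : List Int) : Prop := A ≠ []
instance (A : List Int) : Decidable (Pre_helper A) := by unfold Pre_helper; infer_instance
def pvWitness_helper : List Int := [3, 1, 2, 1]

def Spec_helper (A : List Int) (out : Int) : Prop := out = helper_alt A
instance (A : List Int) (out : Int) : Decidable (Spec_helper A out) := by unfold Spec_helper; infer_instance

-- ===== CLAIM (what is proved, stated in full; the proofs are below) =====
def Claim_equal_helper : Prop := ∀ (A : List Int), Dom_helper A → Pre_helper A → Spec_helper A (helper A)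

-- ===== LEMMAS AND PROOFS =====

-- the index loop over range(a, len(As)) returns the first index >= a whose entry is m (0 if none)
lemma helperLoop_pyRange (As : List Int) (m : Int) :
    ∀ (n a : Nat), a + n = As.length →
      helperLoop As m (PySem.List.pyRange a As.length 1) =
        (match (As.drop a).findIdx? (· == m) with
         | some k => ((a + k : Nat) : Int)
         | none => 0) := by
  intro n
  induction n with
  | zero =>
    intro a ha
    have hnl : ¬ ((a : Int) < (As.length : Int)) := by omega
    have hdrop : As.drop a = [] := List.drop_eq_nil_of_le (by omega)
    rw [hdrop]
    simp [PySem.List.pyRange, hnl, helperLoop]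
  | succ n ih =>
    intro a ha
    have halt : a < As.length := by omega
    have hlt : (a : Int) < (As.length : Int) := by omega
    rw [PySem.List.pyRange_one_cons hlt]
    have hdrop : As.drop a = As[a] :: As.drop (a + 1) := List.drop_eq_getElem_cons halt
    simp only [helperLoop]
    rw [PySem.List.pyGetD_natCast, hdrop, List.findIdx?_cons]
    have hget : As.getD a 0 = As[a] := List.getD_eq_getElem As 0 halt
    rw [hget]
    by_cases hx : As[a] = m
    · simp [hx]
    · have hxb : (As[a] == m) = false := by simp [hx]
      have hcast : ((a : Int) + 1) = (((a + 1 : Nat)) : Int) := by push_cast; ring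
      rw [if_neg hx, hcast, ih (a + 1) (by omega)]
      cases hfi : (As.drop (a + 1)).findIdx? (· == m) with
      | none => simp [hxb]
      | some k =>
        simp only [hxb, Bool.false_eq_true, if_false, Option.map_some]
        push_cast
        ring

-- in a descending list the last element is <= every member
lemma getLast_le_of_desc (S : List Int) :
    S.Pairwise (fun a b => b ≤ a) → ∀ (hne : S ≠ []), ∀ y ∈ S, S.getLast hne ≤ y := by
  induction S with
  | nil => intro _ hne; exact absurd rfl hne
  | cons x t ih =>
    intro h hne y hy
    rw [List.pairwise_cons] at h
    cases t with
    | nil =>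
      simp only [List.mem_singleton] at hy
      subst hy; simp
    | cons z t' =>
      rw [List.getLast_cons (by simp : z :: t' ≠ [])]
      rcases List.mem_cons.mp hy with rfl | hy'
      · exact h.1 _ (List.getLast_mem _)
      · exact ih h.2 _ y hy'

-- first index of the minimum in a descending list = number of strictly greater elements
lemma findIdx?_desc (S : List Int) :
    S.Pairwise (fun a b => b ≤ a) → ∀ m : Int, m ∈ S → (∀ y ∈ S, m ≤ y) →
      S.findIdx? (· == m) = some (S.countP (fun x => decide (m < x))) := by
  induction S with
  | nil => intro _ m hm _; simp at hm
  | cons x t ih =>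
    intro h m hmem hmin
    rw [List.pairwise_cons] at h
    rw [List.findIdx?_cons, List.countP_cons]
    by_cases hx : x = m
    · subst hx
      have ht : t.countP (fun y => decide (x < y)) = 0 := by
        rw [List.countP_eq_zero]
        intro y hy
        have h1 := h.1 y hy
        simp; omega
      simp [ht]
    · have hmx : m < x := lt_of_le_of_ne (hmin x (by simp)) (fun e => hx e.symm)
      have hmt : m ∈ t := by
        rcases List.mem_cons.mp hmem with rfl | h'
        · exact absurd rfl hx
        · exact h'
      have hrec := ih h.2 m hmt (fun y hy => hmin y (List.mem_cons_of_mem _ hy))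
      simp [hx, hrec, hmx]

-- ===== VERDICT (by name: the statement is the Claim_ definition above) =====
theorem helper_spec : Claim_equal_helper := by
  intro A _ hpre
  unfold Spec_helper
  cases hm : PySem.List.min? A (fun x => x) with
  | none => exact absurd ((PySem.List.min?_eq_none_iff A _).mp hm) hpre
  | some m =>
    have hmemA : m ∈ A := PySem.List.min?_mem hm
    have hminA : ∀ y ∈ A, m ≤ y := PySem.List.min?_isMin hm
    have hperm := PySem.List.sorted_perm A (fun x => x) true
    have hSne : PySem.List.sorted A (fun x => x) true ≠ [] := by
      rw [Ne, PySem.List.sorted_eq_nil_iff]; exact hpre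
    have hd := PySem.List.sorted_pairwise_rev A (fun x => x)
    have hmemS : m ∈ PySem.List.sorted A (fun x => x) true := hperm.mem_iff.mpr hmemA
    have hminS : ∀ y ∈ PySem.List.sorted A (fun x => x) true, m ≤ y :=
      fun y hy => hminA y (hperm.mem_iff.mp hy)
    have hlast : PySem.List.pyGetD (PySem.List.sorted A (fun x => x) true) (-1) 0 = m := by
      rw [PySem.List.pyGetD_neg_one _ _ hSne]
      exact le_antisymm (getLast_le_of_desc _ hd hSne m hmemS)
        (hminS _ (List.getLast_mem hSne))
    have hloop : helperLoop (PySem.List.sorted A (fun x => x) true) m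
        (PySem.List.pyRange 0 ((PySem.List.sorted A (fun x => x) true).length) 1) =
        ((PySem.List.sorted A (fun x => x) true).countP (fun x => decide (m < x)) : Int) := by
      have h0 := helperLoop_pyRange (PySem.List.sorted A (fun x => x) true) m
        (PySem.List.sorted A (fun x => x) true).length 0 (by omega)
      simp only [Nat.cast_zero, List.drop_zero] at h0
      rw [h0, findIdx?_desc _ hd m hmemS hminS]
      simp
    have hsum : (A.map (fun x => if m < x then (1 : Int) else 0)).sum =
        (A.countP (fun x => decide (m < x)) : Int) := by
      simpa using PySem.List.sum_map_ite_one_zero (fun x => decide (m < x)) A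
    simp only [helper, helper_alt, hm]
    rw [hlast, hloop, hperm.length_eq, hperm.countP_eq, hsum]
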